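-- pv_equiv track=rewrite | github.com/mohamad-abdelkhalek/FCS54 | Assignment 4/assignment_04_Mohammad_Abdelkhalek.py | decodeMIB
-- ===== SOURCE A (Python) =====
-- def decodeMIB(message):
--     stack = []
--
--     for i in message:
--         if i == '*':
--             if stack:
--                 stack.pop()
--         else:
--             stack.append(i)
--
--     return ''.join(stack)
-- ===== SOURCE B (Python) =====
-- def decodeMIB(message):
--     skip = 0
--     res = []
--     for ch in reversed(message):
--         if ch == '*':
--             skip += 1
--         elif skip > 0:
--             skip -= 1
--         else:
--             res.append(ch)
--     return ''.join(reversed(res))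
-- ===== Notes on version B (the rewrite author's own statement) =====
-- stated objective: alternative
-- what changed: Replaces the left-to-right explicit stack with push/pop by a single right-to-left pass that keeps only an integer skip counter of pending backspaces and collects kept characters, reversing once at the end.
import Mathlib
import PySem

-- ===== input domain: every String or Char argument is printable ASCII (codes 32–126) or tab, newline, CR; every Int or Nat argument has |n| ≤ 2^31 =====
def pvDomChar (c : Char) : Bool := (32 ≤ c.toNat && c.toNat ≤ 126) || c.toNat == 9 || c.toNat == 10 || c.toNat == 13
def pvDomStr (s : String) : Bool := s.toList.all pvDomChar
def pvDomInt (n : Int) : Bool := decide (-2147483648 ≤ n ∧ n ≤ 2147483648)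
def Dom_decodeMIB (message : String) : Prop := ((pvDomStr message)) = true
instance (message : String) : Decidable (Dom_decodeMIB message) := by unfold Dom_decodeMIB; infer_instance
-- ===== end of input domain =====

-- B replaces A's explicit character stack (push/pop, left-to-right) by a single
-- right-to-left pass with an integer skip counter; alternative decomposition, same cost.

-- ===== PORT A =====
-- the loop body: '*' pops the stack (no-op when empty, matching the 'if stack' guard), else push
def pvAStep (st : List Char) (c : Char) : List Char :=
  if c = '*' then st.dropLast else st ++ [c]

def decodeMIB (message : String) : String :=
  String.ofList (message.toList.foldl pvAStep [])

-- ===== PORT B =====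
-- right-to-left loop of Source B: skip counter, kept chars appended to res, reversed at the end
def pvBGo : List Char → Nat → List Char → List Char
  | [], _, res => res
  | c :: rest, skip, res =>
    if c = '*' then pvBGo rest (skip + 1) res
    else if skip > 0 then pvBGo rest (skip - 1) res
    else pvBGo rest skip (res ++ [c])

def decodeMIB_alt (message : String) : String :=
  String.ofList ((pvBGo message.toList.reverse 0 []).reverse)

-- ===== PRECONDITION & SPEC =====
def Spec_decodeMIB (message : String) (out : String) : Prop := out = decodeMIB_alt message
instance (message : String) (out : String) : Decidable (Spec_decodeMIB message out) := by unfold Spec_decodeMIB; infer_instance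

-- ===== CLAIM (what is proved, stated in full; the proofs are below) =====
def Claim_equal_decodeMIB : Prop := ∀ (message : String), Dom_decodeMIB message → Spec_decodeMIB message (decodeMIB message)

-- ===== LEMMAS AND PROOFS =====

-- Invariant: running B's reverse loop on rl computes res ++ (A's stack on rl.reverse,
-- with its last `skip` entries removed, reversed).
theorem pvBGo_eq (rl : List Char) : ∀ (skip : Nat) (res : List Char),
    pvBGo rl skip res =
      res ++ (((rl.reverse.foldl pvAStep []).take
        ((rl.reverse.foldl pvAStep []).length - skip)).reverse) := by
  induction rl with
  | nil => intro skip res; simp [pvBGo]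
  | cons c rest ih =>
    intro skip res
    have hrev : (c :: rest).reverse = rest.reverse ++ [c] := by simp
    set s := rest.reverse.foldl pvAStep [] with hs
    have hfold : (c :: rest).reverse.foldl pvAStep [] = pvAStep s c := by
      rw [hrev, List.foldl_append]; rfl
    by_cases hc : c = '*'
    · have : pvAStep s c = s.dropLast := by simp [pvAStep, hc]
      rw [pvBGo, if_pos hc, ih (skip + 1) res, hfold, this]
      congr 2
      rw [List.dropLast_eq_take]
      rw [List.take_take]
      congr 1
      simp
      omega
    · rw [pvBGo, if_neg hc]
      have hstep : pvAStep s c = s ++ [c] := by simp [pvAStep, hc]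
      by_cases hskip : skip > 0
      · rw [if_pos hskip, ih (skip - 1) res, hfold, hstep]
        congr 2
        have hlen : (s ++ [c]).length - skip = s.length - (skip - 1) := by
          simp; omega
        rw [hlen, List.take_append_of_le_length (Nat.sub_le _ _)]
      · rw [if_neg hskip, ih skip (res ++ [c]), hfold, hstep]
        have hsk : skip = 0 := by omega
        subst hsk
        have ht : List.take ((s ++ [c]).length - 0) (s ++ [c]) = s ++ [c] := by simp
        rw [ht]; simp

-- ===== VERDICT (by name: the statement is the Claim_ definition above) =====
theorem decodeMIB_spec : Claim_equal_decodeMIB := by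
  intro message _
  unfold Spec_decodeMIB decodeMIB decodeMIB_alt
  rw [pvBGo_eq]
  simp
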